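-- pv_equiv track=rewrite | github.com/prathamtandon/python-algorithms-and-data-structures | Moderate/pondSizes/pondSizes.py | computePondSizes
-- ===== SOURCE A (Python) =====
-- def computePondSizes(land):
--     pondSizes = []
--     for r in range(len(land)):
--         for c in range(len(land[0])):
--             if land[r][c] == 0:
--                 size = computeSize(land,r,c)
--                 pondSizes.append(size)
--
--     return pondSizes
--
-- def computeSize(land,r,c):
--     if r < 0 or c < 0 or r >= len(land) or c >= len(land[0]) or land[r][c] != 0:
--         return 0
--
--     size = 1
--     land[r][c] = -1
--     size += computeSize(land,r+1,c)
--     size += computeSize(land,r-1,c)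
--     size += computeSize(land,r,c+1)
--     size += computeSize(land,r,c-1)
--     size += computeSize(land,r+1,c+1)
--     size += computeSize(land,r+1,c-1)
--     size += computeSize(land,r-1,c+1)
--     size += computeSize(land,r-1,c-1)
--
--     return size
-- ===== SOURCE B (Python) =====
-- def computePondSizes(land):
--     pondSizes = []
--     for r in range(len(land)):
--         for c in range(len(land[0])):
--             if land[r][c] == 0:
--                 count = 0
--                 stack = [(r, c)]
--                 while stack:
--                     rr, cc = stack.pop()
--                     if rr < 0 or cc < 0 or rr >= len(land) or cc >= len(land[0]) or land[rr][cc] != 0: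
--                         continue
--                     land[rr][cc] = -1
--                     count += 1
--                     stack.extend([(rr - 1, cc - 1), (rr - 1, cc + 1),
--                                   (rr + 1, cc - 1), (rr + 1, cc + 1),
--                                   (rr, cc - 1), (rr, cc + 1),
--                                   (rr - 1, cc), (rr + 1, cc)])
--                 pondSizes.append(count)
--     return pondSizes
-- ===== Notes on version B (the rewrite author's own statement) =====
-- stated objective: alternative
-- what changed: The recursive 8-directional flood fill (computeSize) is replaced by an iterative DFS with an explicit stack: pop a cell, skip unless it is still 0, flip it to -1, count it and push its 8 neighbours; no helper recursion remains.
import Mathlib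
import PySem

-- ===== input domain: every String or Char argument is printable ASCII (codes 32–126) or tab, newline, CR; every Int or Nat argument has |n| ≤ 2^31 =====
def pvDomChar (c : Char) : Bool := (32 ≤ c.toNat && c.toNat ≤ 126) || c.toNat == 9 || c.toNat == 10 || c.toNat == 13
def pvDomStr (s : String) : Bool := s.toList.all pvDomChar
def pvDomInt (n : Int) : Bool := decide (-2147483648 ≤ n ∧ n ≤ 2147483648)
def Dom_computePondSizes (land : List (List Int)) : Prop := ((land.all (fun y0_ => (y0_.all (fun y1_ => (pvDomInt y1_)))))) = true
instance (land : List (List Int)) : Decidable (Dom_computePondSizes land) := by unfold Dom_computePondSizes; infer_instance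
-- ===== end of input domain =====

-- B replaces A's recursive flood fill by an iterative explicit-stack DFS; both Pythons mutate
-- `land` in place identically (the whole pond is set to -1); the Lean ports model the grid
-- functionally and the theorem is about the returned list of pond sizes.

-- shared grid primitives (cell read: default -1 is only reached outside Pre_, where Python raises)
def pvGet (land : List (List Int)) (r c : Int) : Int :=
  (land.getD r.toNat []).getD c.toNat (-1)

def pvSet (land : List (List Int)) (r c : Int) (v : Int) : List (List Int) :=
  land.set r.toNat ((land.getD r.toNat []).set c.toNat v)

def pvZeros (land : List (List Int)) : Nat := (land.map (fun row => row.count 0)).sum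

-- the row-major list of (r, c) scanned by both outer double loops (lengths never change)
def pvCells (land : List (List Int)) : List (Nat × Nat) :=
  (List.range land.length).flatMap
    (fun r => (List.range (land.headD []).length).map (fun c => (r, c)))

theorem pvCount_set_zero (row : List Int) (i : Nat) (hv : row.getD i (-1) = 0) :
    (row.set i (-1)).count 0 + 1 = row.count 0 := by
  induction row generalizing i with
  | nil => simp [List.getD] at hv
  | cons a t ih =>
    cases i with
    | zero => simp_all
    | succ j =>
      have := ih j (by simpa [List.getD] using hv)
      simp [List.count_cons]
      omega

theorem pvZeros_setNat (land : List (List Int)) (n i : Nat)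
    (hn : n < land.length) (hv : (land.getD n []).getD i (-1) = 0) :
    pvZeros (land.set n ((land.getD n []).set i (-1))) + 1 = pvZeros land := by
  induction land generalizing n with
  | nil => simp at hn
  | cons row t ih =>
    cases n with
    | zero =>
      simp [pvZeros] at hv ⊢
      have := pvCount_set_zero row i hv
      omega
    | succ m =>
      have := ih m (by simpa using hn) (by simpa using hv)
      simp [pvZeros] at this ⊢
      omega

theorem pvZeros_set (land : List (List Int)) (r c : Int)
    (hr : r.toNat < land.length) (hv : pvGet land r c = 0) :
    pvZeros (pvSet land r c (-1)) + 1 = pvZeros land :=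
  pvZeros_setNat land r.toNat c.toNat hr hv

-- ===== PORT A =====
-- computeSize, transliterated; the recursion is run on fuel pvZeros land + 1, which the
-- lemmas below show is never exhausted (each recursive level flips one zero to -1).
def computeSizeF : Nat → List (List Int) → Int → Int → Int × List (List Int)
  | 0, land, _, _ => (0, land)
  | fuel + 1, land, r, c =>
    if r < 0 ∨ c < 0 ∨ (land.length : Int) ≤ r ∨ ((land.headD []).length : Int) ≤ c ∨
        pvGet land r c ≠ 0 then
      (0, land)
    else
      let p1 := computeSizeF fuel (pvSet land r c (-1)) (r + 1) c
      let p2 := computeSizeF fuel p1.2 (r - 1) c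
      let p3 := computeSizeF fuel p2.2 r (c + 1)
      let p4 := computeSizeF fuel p3.2 r (c - 1)
      let p5 := computeSizeF fuel p4.2 (r + 1) (c + 1)
      let p6 := computeSizeF fuel p5.2 (r + 1) (c - 1)
      let p7 := computeSizeF fuel p6.2 (r - 1) (c + 1)
      let p8 := computeSizeF fuel p7.2 (r - 1) (c - 1)
      (1 + p1.1 + p2.1 + p3.1 + p4.1 + p5.1 + p6.1 + p7.1 + p8.1, p8.2)

def computeSize (land : List (List Int)) (r c : Int) : Int × List (List Int) :=
  computeSizeF (pvZeros land + 1) land r c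

def scanA (cells : List (Nat × Nat)) (land : List (List Int)) (acc : List Int) :
    List Int × List (List Int) :=
  match cells with
  | [] => (acc, land)
  | (r, c) :: rest =>
    if pvGet land (r : Int) (c : Int) = 0 then
      let p := computeSize land (r : Int) (c : Int)
      scanA rest p.2 (acc ++ [p.1])
    else scanA rest land acc

def computePondSizes (land : List (List Int)) : List Int :=
  (scanA (pvCells land) land []).1

-- ===== PORT B =====
-- the explicit-stack DFS loop (pop from the head = Python's pop() from the end)
def pondLoop (land : List (List Int)) (stack : List (Int × Int)) (count : Int) :
    Int × List (List Int) :=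
  match stack with
  | [] => (count, land)
  | (r, c) :: rest =>
    if h : r < 0 ∨ c < 0 ∨ (land.length : Int) ≤ r ∨ ((land.headD []).length : Int) ≤ c ∨
        pvGet land r c ≠ 0 then
      pondLoop land rest count
    else
      pondLoop (pvSet land r c (-1))
        ((r + 1, c) :: (r - 1, c) :: (r, c + 1) :: (r, c - 1) ::
         (r + 1, c + 1) :: (r + 1, c - 1) :: (r - 1, c + 1) :: (r - 1, c - 1) :: rest)
        (count + 1)
termination_by 9 * pvZeros land + stack.length
decreasing_by
  · simp only [List.length_cons]; omega
  · have hz : pvZeros (pvSet land r c (-1)) + 1 = pvZeros land :=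
      pvZeros_set land r c (by omega) (by omega)
    simp only [List.length_cons]; omega

def scanB (cells : List (Nat × Nat)) (land : List (List Int)) (acc : List Int) :
    List Int × List (List Int) :=
  match cells with
  | [] => (acc, land)
  | (r, c) :: rest =>
    if pvGet land (r : Int) (c : Int) = 0 then
      let q := pondLoop land [((r : Int), (c : Int))] 0
      scanB rest q.2 (acc ++ [q.1])
    else scanB rest land acc

def computePondSizes_alt (land : List (List Int)) : List Int :=
  (scanB (pvCells land) land []).1

-- ===== PRECONDITION & SPEC =====
-- Pre_ excludes ragged grids whose later rows are shorter than row 0: there Python A (and B)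
-- raises IndexError reading land[r][c].
def Pre_computePondSizes (land : List (List Int)) : Prop :=
  ∀ row ∈ land, (land.headD []).length ≤ row.length
instance (land : List (List Int)) : Decidable (Pre_computePondSizes land) := by
  unfold Pre_computePondSizes; infer_instance
def pvWitness_computePondSizes : List (List Int) := [[0, 1], [1, 0]]

def Spec_computePondSizes (land : List (List Int)) (out : List Int) : Prop :=
  out = computePondSizes_alt land
instance (land : List (List Int)) (out : List Int) : Decidable (Spec_computePondSizes land out) := by
  unfold Spec_computePondSizes; infer_instance

-- ===== CLAIM (what is proved, stated in full; the proofs are below) =====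
def Claim_equal_computePondSizes : Prop := ∀ (land : List (List Int)), Dom_computePondSizes land → Pre_computePondSizes land → Spec_computePondSizes land (computePondSizes land)

-- ===== LEMMAS AND PROOFS =====

-- the flood fill never creates zeros
theorem pvZeros_computeSizeF (f : Nat) :
    ∀ (land : List (List Int)) (r c : Int),
      pvZeros (computeSizeF f land r c).2 ≤ pvZeros land := by
  induction f with
  | zero => intro land r c; simp [computeSizeF]
  | succ g ih =>
    intro land r c
    rw [computeSizeF]
    split
    · simp
    · rename_i h
      have hz : pvZeros (pvSet land r c (-1)) + 1 = pvZeros land :=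
        pvZeros_set land r c (by omega) (by omega)
      simp only []
      calc pvZeros (computeSizeF g (computeSizeF g (computeSizeF g (computeSizeF g
              (computeSizeF g (computeSizeF g (computeSizeF g (computeSizeF g
                (pvSet land r c (-1)) (r+1) c).2 (r-1) c).2 r (c+1)).2 r (c-1)).2
                  (r+1) (c+1)).2 (r+1) (c-1)).2 (r-1) (c+1)).2 (r-1) (c-1)).2
          ≤ pvZeros (pvSet land r c (-1)) := by
            exact le_trans (ih _ _ _) (le_trans (ih _ _ _) (le_trans (ih _ _ _)
              (le_trans (ih _ _ _) (le_trans (ih _ _ _) (le_trans (ih _ _ _)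
                (le_trans (ih _ _ _) (ih _ _ _)))))))
        _ ≤ pvZeros land := by omega

-- the stack loop run from one pending cell is exactly A's recursive call, then the rest
theorem pondLoop_sim (f : Nat) :
    ∀ (land : List (List Int)) (r c : Int) (stack : List (Int × Int)) (count : Int),
      pvZeros land < f →
      pondLoop land ((r, c) :: stack) count =
        pondLoop (computeSizeF f land r c).2 stack (count + (computeSizeF f land r c).1) := by
  induction f with
  | zero => intro land r c stack count hf; omega
  | succ g ih =>
    intro land r c stack count hf
    rw [pondLoop, computeSizeF]
    by_cases h : r < 0 ∨ c < 0 ∨ (land.length : Int) ≤ r ∨ ((land.headD []).length : Int) ≤ c ∨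
        pvGet land r c ≠ 0
    · rw [dif_pos h, if_pos h]; simp
    · rw [dif_neg h, if_neg h]
      have hz : pvZeros (pvSet land r c (-1)) + 1 = pvZeros land :=
        pvZeros_set land r c (by omega) (by omega)
      set l0 := pvSet land r c (-1) with hl0
      set q1 := computeSizeF g l0 (r + 1) c with hq1
      set q2 := computeSizeF g q1.2 (r - 1) c with hq2
      set q3 := computeSizeF g q2.2 r (c + 1) with hq3
      set q4 := computeSizeF g q3.2 r (c - 1) with hq4
      set q5 := computeSizeF g q4.2 (r + 1) (c + 1) with hq5
      set q6 := computeSizeF g q5.2 (r + 1) (c - 1) with hq6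
      set q7 := computeSizeF g q6.2 (r - 1) (c + 1) with hq7
      have b0 : pvZeros l0 < g := by omega
      have b1 : pvZeros q1.2 < g := lt_of_le_of_lt (by rw [hq1]; exact pvZeros_computeSizeF g _ _ _) b0
      have b2 : pvZeros q2.2 < g := lt_of_le_of_lt (by rw [hq2]; exact pvZeros_computeSizeF g _ _ _) b1
      have b3 : pvZeros q3.2 < g := lt_of_le_of_lt (by rw [hq3]; exact pvZeros_computeSizeF g _ _ _) b2
      have b4 : pvZeros q4.2 < g := lt_of_le_of_lt (by rw [hq4]; exact pvZeros_computeSizeF g _ _ _) b3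
      have b5 : pvZeros q5.2 < g := lt_of_le_of_lt (by rw [hq5]; exact pvZeros_computeSizeF g _ _ _) b4
      have b6 : pvZeros q6.2 < g := lt_of_le_of_lt (by rw [hq6]; exact pvZeros_computeSizeF g _ _ _) b5
      have b7 : pvZeros q7.2 < g := lt_of_le_of_lt (by rw [hq7]; exact pvZeros_computeSizeF g _ _ _) b6
      rw [ih l0 _ _ _ _ b0, ih q1.2 _ _ _ _ b1, ih q2.2 _ _ _ _ b2, ih q3.2 _ _ _ _ b3,
          ih q4.2 _ _ _ _ b4, ih q5.2 _ _ _ _ b5, ih q6.2 _ _ _ _ b6, ih q7.2 _ _ _ _ b7]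
      congr 1
      ring

theorem scan_sim (cells : List (Nat × Nat)) :
    ∀ (land : List (List Int)) (acc : List Int),
      scanA cells land acc = scanB cells land acc := by
  induction cells with
  | nil => intro land acc; rfl
  | cons rc rest ih =>
    obtain ⟨r, c⟩ := rc
    intro land acc
    rw [scanA, scanB]
    by_cases h : pvGet land (r : Int) (c : Int) = 0
    · simp only [h, if_true]
      have := pondLoop_sim (pvZeros land + 1) land (r : Int) (c : Int) [] 0 (by omega)
      rw [pondLoop] at this
      simp only [computeSize, this, zero_add]
      exact ih _ _
    · simp only [h, if_false]
      exact ih _ _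

-- ===== VERDICT (by name: the statement is the Claim_ definition above) =====
theorem computePondSizes_spec : Claim_equal_computePondSizes := by
  intro land _ _
  unfold Spec_computePondSizes computePondSizes computePondSizes_alt
  rw [scan_sim]
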